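-- pv_equiv track=rewrite | github.com/tomgimat/projet_inference | main.py | get_idEntite
-- ===== SOURCE A (Python) =====
-- def get_idEntite(mot, entite, donnees):
--     jsonData = donnees["e"]
--
--     idEntite = -1
--     idMot = -1
--     for entity in jsonData:
--         name = jsonData[entity]['name']
--         x = name.replace("'", "", 2)
--         if x == entite:
--             idEntite = entity
--         if x == mot:
--             idMot = entity
--
--     result = {"idEntite": idEntite, "idMot": idMot}
--     return result
-- ===== SOURCE B (Python) =====
-- def get_idEntite(mot, entite, donnees):
--     # Stage 1: materialize the cleaned (name, key) pairs in one pass.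
--     # Stage 2: answer each query by scanning BACKWARD with early exit:
--     # the first match from the end is exactly A's "last wins" result.
--     entries = [(data['name'].replace("'", "", 2), key)
--                for key, data in donnees["e"].items()]
--
--     def last_id(target):
--         for name, key in reversed(entries):
--             if name == target:
--                 return key
--         return -1
--
--     return {"idEntite": last_id(entite), "idMot": last_id(mot)}
-- ===== Notes on version B (the rewrite author's own statement) =====
-- stated objective: alternative
-- what changed: B first materializes the cleaned (name,key) pairs, then answers each query by a backward scan with early exit (first match from the end), replacing A's forward loop that maintains two overwriting accumulators.
import Mathlib
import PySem

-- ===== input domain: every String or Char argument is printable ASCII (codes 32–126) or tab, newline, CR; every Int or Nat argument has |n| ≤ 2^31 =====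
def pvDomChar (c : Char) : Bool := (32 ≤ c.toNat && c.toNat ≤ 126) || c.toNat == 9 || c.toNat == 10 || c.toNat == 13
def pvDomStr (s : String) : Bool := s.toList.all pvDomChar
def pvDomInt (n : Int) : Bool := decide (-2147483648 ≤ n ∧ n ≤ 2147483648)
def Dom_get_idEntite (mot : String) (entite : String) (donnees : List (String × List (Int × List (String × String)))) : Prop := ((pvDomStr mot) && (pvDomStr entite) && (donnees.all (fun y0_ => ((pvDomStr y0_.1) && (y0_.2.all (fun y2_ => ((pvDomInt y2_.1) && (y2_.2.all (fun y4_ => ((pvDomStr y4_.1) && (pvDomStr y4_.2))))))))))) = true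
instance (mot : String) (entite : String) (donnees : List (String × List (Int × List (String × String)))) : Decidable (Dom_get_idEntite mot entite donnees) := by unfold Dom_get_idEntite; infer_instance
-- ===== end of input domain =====

-- ===== PORT A =====
-- B: materialize cleaned (name,key) pairs once, then answer each query by a backward
-- early-exit scan (first match from the end), instead of A's forward overwrite loop (alternative decomposition; same cost).
-- name.replace("'", "", 2): PySem has no count-limited replace; exact hand port (old is one char, new is empty).
def replaceQuote2 : List Char → Nat → List Char
  | [], _ => []
  | c :: cs, 0 => c :: cs
  | c :: cs, n+1 => if c = '\'' then replaceQuote2 cs n else c :: replaceQuote2 cs (n+1)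

def get_idEntite (mot : String) (entite : String) (donnees : List (String × List (Int × List (String × String)))) : List (String × Int) :=
  let jsonData := PySem.Dict.ofList (((PySem.Dict.ofList donnees).get? "e").getD [])
  let res := jsonData.keys.foldl (fun st entity =>
      let name := ((PySem.Dict.ofList (jsonData.getD entity [])).get? "name").getD ""
      let x := String.ofList (replaceQuote2 name.toList 2)
      (if x == entite then entity else st.1, if x == mot then entity else st.2))
    ((-1 : Int), (-1 : Int))
  [("idEntite", res.1), ("idMot", res.2)]

-- ===== PORT B =====
def pvClean (v : List (String × String)) : String :=
  String.ofList (replaceQuote2 (((PySem.Dict.ofList v).get? "name").getD "").toList 2)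

-- B's `last_id`: first match scanning the (reversed) list, early exit, default -1.
def lastId (target : String) : List (String × Int) → Int
  | [] => -1
  | (n, k) :: rest => if n == target then k else lastId target rest

def get_idEntite_alt (mot : String) (entite : String) (donnees : List (String × List (Int × List (String × String)))) : List (String × Int) :=
  let jsonData := PySem.Dict.ofList (((PySem.Dict.ofList donnees).get? "e").getD [])
  let entries := jsonData.items.map (fun p => (pvClean p.2, p.1))
  [("idEntite", lastId entite entries.reverse), ("idMot", lastId mot entries.reverse)]

-- ===== PRECONDITION & SPEC =====
-- A (and B) raise KeyError when donnees has no key "e" or some entity dict lacks key "name"; Pre_ excludes exactly those inputs.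
def Pre_get_idEntite (_mot : String) (_entite : String) (donnees : List (String × List (Int × List (String × String)))) : Prop :=
  (PySem.Dict.ofList donnees).contains "e" = true ∧
  ∀ p ∈ (PySem.Dict.ofList (((PySem.Dict.ofList donnees).get? "e").getD [])).items,
    (PySem.Dict.ofList p.2).contains "name" = true
instance (mot : String) (entite : String) (donnees : List (String × List (Int × List (String × String)))) : Decidable (Pre_get_idEntite mot entite donnees) := by unfold Pre_get_idEntite; infer_instance

def pvWitness_get_idEntite : String × String × (List (String × List (Int × List (String × String)))) :=
  ("cat", "dog", [("e", [(1, [("name", "dog")]), (2, [("name", "ca't")])])])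

def Spec_get_idEntite (mot : String) (entite : String) (donnees : List (String × List (Int × List (String × String)))) (out : List (String × Int)) : Prop := out = get_idEntite_alt mot entite donnees
instance (mot : String) (entite : String) (donnees : List (String × List (Int × List (String × String)))) (out : List (String × Int)) : Decidable (Spec_get_idEntite mot entite donnees out) := by unfold Spec_get_idEntite; infer_instance

-- ===== CLAIM (what is proved, stated in full; the proofs are below) =====
def Claim_equal_get_idEntite : Prop := ∀ (mot : String) (entite : String) (donnees : List (String × List (Int × List (String × String)))), Dom_get_idEntite mot entite donnees → Pre_get_idEntite mot entite donnees → Spec_get_idEntite mot entite donnees (get_idEntite mot entite donnees)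

-- ===== LEMMAS AND PROOFS =====

-- a fold over a pair state whose components evolve independently splits into two folds
theorem foldl_pair_split {α β γ : Type} (l : List γ) (f : α → γ → α) (g : β → γ → β)
    (a0 : α) (b0 : β) :
    l.foldl (fun st x => (f st.1 x, g st.2 x)) (a0, b0) = (l.foldl f a0, l.foldl g b0) := by
  induction l generalizing a0 b0 with
  | nil => rfl
  | cons x xs ih => simpa using ih (f a0 x) (g b0 x)

-- lastId with an explicit default
def lastIdD (target : String) : List (String × Int) → Int → Int
  | [], a => a
  | (n, k) :: rest, a => if n == target then k else lastIdD target rest a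

theorem lastId_eq_lastIdD (s : String) (l : List (String × Int)) :
    lastId s l = lastIdD s l (-1) := by
  induction l with
  | nil => rfl
  | cons p ps ih => cases p; simp [lastId, lastIdD, ih]

theorem lastIdD_append_singleton (s : String) (xs : List (String × Int)) (p : String × Int) (a : Int) :
    lastIdD s (xs ++ [p]) a = lastIdD s xs (if p.1 == s then p.2 else a) := by
  induction xs with
  | nil => cases p with | mk n k => by_cases h : n = s <;> simp [lastIdD, h]
  | cons q qs ih => cases q; simp [lastIdD, ih]

-- A's forward "last wins" fold equals B's first-match scan of the reversed list
theorem foldl_lastwins_eq_lastIdD (s : String) (l : List (String × Int)) (a : Int) :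
    l.foldl (fun acc p => if p.1 == s then p.2 else acc) a = lastIdD s l.reverse a := by
  induction l generalizing a with
  | nil => rfl
  | cons p ps ih =>
    simp only [List.foldl_cons, List.reverse_cons, lastIdD_append_singleton]
    exact ih _

theorem ports_eq (mot entite : String) (donnees : List (String × List (Int × List (String × String)))) :
    get_idEntite mot entite donnees = get_idEntite_alt mot entite donnees := by
  unfold get_idEntite get_idEntite_alt
  simp only []
  set jd := PySem.Dict.ofList (((PySem.Dict.ofList donnees).get? "e").getD []) with hjd
  have hnd : jd.keys.Nodup := PySem.Dict.nodup_keys_ofList _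
  have hkeys : jd.keys = jd.items.map (·.1) := rfl
  have hgetD : ∀ p ∈ jd.items, jd.getD p.1 [] = p.2 := by
    intro p hp
    exact PySem.Dict.getD_of_mem_items jd hp hnd []
  have hbody : List.foldl (fun (x : Int × Int) (y : Int × List (String × String)) =>
        (if String.ofList (replaceQuote2 (((PySem.Dict.ofList (jd.getD y.1 [])).get? "name").getD "").toList 2) == entite then y.1 else x.1,
         if String.ofList (replaceQuote2 (((PySem.Dict.ofList (jd.getD y.1 [])).get? "name").getD "").toList 2) == mot then y.1 else x.2))
      ((-1 : Int), (-1 : Int)) jd.items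
      = List.foldl (fun (x : Int × Int) y =>
        (if pvClean y.2 == entite then y.1 else x.1, if pvClean y.2 == mot then y.1 else x.2))
      ((-1 : Int), (-1 : Int)) jd.items := by
    apply PySem.List.foldl_congr_mem
    intro acc p hp
    rw [hgetD p hp]
    rfl
  have hsplit : List.foldl (fun (x : Int × Int) (y : Int × List (String × String)) =>
        (if pvClean y.2 == entite then y.1 else x.1, if pvClean y.2 == mot then y.1 else x.2))
      ((-1 : Int), (-1 : Int)) jd.items
      = (List.foldl (fun x y => if pvClean y.2 == entite then y.1 else x) (-1 : Int) jd.items,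
         List.foldl (fun x y => if pvClean y.2 == mot then y.1 else x) (-1 : Int) jd.items) :=
    foldl_pair_split jd.items (fun x y => if pvClean y.2 == entite then y.1 else x)
      (fun x y => if pvClean y.2 == mot then y.1 else x) (-1) (-1)
  have hcomp : ∀ s : String,
      List.foldl (fun x (y : Int × List (String × String)) => if pvClean y.2 == s then y.1 else x) (-1 : Int) jd.items
        = lastId s (jd.items.map (fun p => (pvClean p.2, p.1))).reverse := by
    intro s
    rw [lastId_eq_lastIdD, ← foldl_lastwins_eq_lastIdD, List.foldl_map]
  rw [hkeys, List.foldl_map, hbody, hsplit]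
  simp only [hcomp]

-- ===== VERDICT (by name: the statement is the Claim_ definition above) =====
theorem get_idEntite_spec : Claim_equal_get_idEntite := by
  intro mot entite donnees _ _
  exact ports_eq mot entite donnees
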